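-- pv_equiv track=rewrite | github.com/ACFHarbinger/WSmartPlus-Route | logic/src/utils/log_utils.py | _sort_log
-- ===== SOURCE A (Python) =====
-- def _sort_log(log):
--     log = {key: value for key, value in sorted(log.items())}
--     tmp_log = {}
--     for key in log.keys():
--         if "policy_last_minute" in key:
--             tmp_log[key] = log[key]
--     for key in log.keys():
--         if "policy_regular" in key:
--             tmp_log[key] = log[key]
--     for key in log.keys():
--         if "policy_look_ahead" in key:
--             tmp_log[key] = log[key]
--     for key in log.keys():
--         if "gurobi" in key:
--             tmp_log[key] = log[key]
--     for key in log.keys():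
--         if "hexaly" in key:
--             tmp_log[key] = log[key]
--     for key in tmp_log.keys():
--         log[key] = log.pop(key)
--     return log
-- ===== SOURCE B (Python) =====
-- CATS = ["policy_last_minute", "policy_regular", "policy_look_ahead", "gurobi", "hexaly"]
--
--
-- def _rank(key):
--     # 0 for keys in no category; otherwise 1..5 for the FIRST matching category.
--     return next((i + 1 for i, c in enumerate(CATS) if c in key), 0)
--
--
-- def _sort_log(log):
--     return dict(sorted(log.items(), key=lambda kv: (_rank(kv[0]), kv[0])))
-- ===== Notes on version B (the rewrite author's own statement) =====
-- stated objective: simpler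
-- what changed: Replaces the alphabetical pre-sort plus five category scans into a temporary dict plus a pop/reinsert loop by a single sorted() call with a composite key (rank of the first matching category, then the key itself).
import Mathlib
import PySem

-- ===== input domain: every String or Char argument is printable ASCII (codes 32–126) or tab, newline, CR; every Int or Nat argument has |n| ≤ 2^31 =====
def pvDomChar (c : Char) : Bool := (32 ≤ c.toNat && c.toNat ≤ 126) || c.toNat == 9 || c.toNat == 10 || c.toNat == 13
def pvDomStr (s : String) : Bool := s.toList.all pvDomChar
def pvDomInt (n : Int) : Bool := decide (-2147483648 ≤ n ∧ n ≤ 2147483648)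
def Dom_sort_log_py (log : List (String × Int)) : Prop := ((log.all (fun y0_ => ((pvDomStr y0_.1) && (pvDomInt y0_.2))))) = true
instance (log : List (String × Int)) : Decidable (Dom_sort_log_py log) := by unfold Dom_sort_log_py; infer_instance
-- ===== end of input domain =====

-- B replaces A's five category scans into a temporary dict plus a pop/reinsert loop by one
-- keyed sort (rank of first matching category, then key) — objective: simpler.

-- ===== PORT A =====
-- A-side helper: one 'for key in log.keys(): if cat in key: tmp_log[key] = log[key]' pass
-- (the Python repeats this block five times verbatim; log[key] always exists, ported as getD _ 0).
def pvPassA (d : PySem.Dict String Int) (cat : String) (tmp : PySem.Dict String Int) :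
    PySem.Dict String Int :=
  d.keys.foldl (fun t k => if PySem.Str.isIn cat k then t.insert k (d.getD k 0) else t) tmp

def sort_log_py (log : List (String × Int)) : List (String × Int) :=
  -- log = {key: value for key, value in sorted(log.items())}: the items' keys are distinct,
  -- so Python's tuple sort compares keys only
  let log1 := PySem.Dict.ofList
    (PySem.List.sorted (PySem.Dict.ofList log).items (fun p => p.1) false)
  let tmp1 := pvPassA log1 "policy_last_minute" PySem.Dict.empty
  let tmp2 := pvPassA log1 "policy_regular" tmp1
  let tmp3 := pvPassA log1 "policy_look_ahead" tmp2
  let tmp4 := pvPassA log1 "gurobi" tmp3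
  let tmp5 := pvPassA log1 "hexaly" tmp4
  -- for key in tmp_log.keys(): log[key] = log.pop(key)  (the key is always present, pop? = some)
  let log2 := tmp5.keys.foldl (fun d k =>
    match d.pop? k with
    | some (v, d') => d'.insert k v
    | none => d) log1
  log2.items

-- ===== PORT B =====
def pvCats : List String :=
  ["policy_last_minute", "policy_regular", "policy_look_ahead", "gurobi", "hexaly"]

-- 0 for keys in no category, else 1..5 for the FIRST matching category
def pvRank (k : String) : Nat :=
  match pvCats.findIdx? (fun c => PySem.Str.isIn c k) with
  | some i => i + 1
  | none => 0

def sort_log_py_alt (log : List (String × Int)) : List (String × Int) :=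
  (PySem.Dict.ofList (PySem.List.sorted (PySem.Dict.ofList log).items
      (fun kv => (toLex (pvRank kv.1, kv.1) : Lex (Nat × String))) false)).items

-- ===== PRECONDITION & SPEC =====
def Spec_sort_log_py (log : List (String × Int)) (out : List (String × Int)) : Prop := out = sort_log_py_alt log
instance (log : List (String × Int)) (out : List (String × Int)) : Decidable (Spec_sort_log_py log out) := by unfold Spec_sort_log_py; infer_instance

-- ===== CLAIM (what is proved, stated in full; the proofs are below) =====
def Claim_equal_sort_log_py : Prop := ∀ (log : List (String × Int)), Dom_sort_log_py log → Spec_sort_log_py log (sort_log_py log)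

-- ===== LEMMAS AND PROOFS =====

-- rank-i block of a list of items
def pvF (s : List (String × Int)) (i : Nat) : List (String × Int) :=
  s.filter (fun p => pvRank p.1 == i)

-- remaining-unmatched block decomposition of A's five passes
def pvBlocks (s : List (String × Int)) (cs : List String) : List (String × Int) :=
  match cs with
  | [] => []
  | c :: rest =>
      s.filter (fun p => PySem.Str.isIn c p.1)
        ++ pvBlocks (s.filter (fun p => !PySem.Str.isIn c p.1)) rest

-- B's comparison key, as a Prop relation
def pvKeyLt (a b : String × Int) : Prop :=
  (toLex (pvRank a.1, a.1) : Lex (Nat × String)) < toLex (pvRank b.1, b.1)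

theorem pv_items_ofList {t : List (String × Int)} (h : (t.map (·.1)).Nodup) :
    (PySem.Dict.ofList t).items = t := by
  have := PySem.Dict.items_foldl_insert_fresh (ν := Int) t (·.1) (·.2) PySem.Dict.empty
    (by simp) h
  simpa [PySem.Dict.ofList, PySem.Dict.update] using this

theorem pv_uniq {s : List (String × Int)} (h : (s.map (·.1)).Nodup) :
    ∀ p ∈ s, ∀ q ∈ s, p.1 = q.1 → p = q := by
  intro p hp q hq hk
  have hnd : (PySem.Dict.mk (κ := String) (ν := Int) s).keys.Nodup := h
  have h1 := PySem.Dict.get?_of_mem_items (PySem.Dict.mk s) (k := p.1) (v := p.2)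
    (by simpa using hp) hnd
  have h2 := PySem.Dict.get?_of_mem_items (PySem.Dict.mk s) (k := q.1) (v := q.2)
    (by simpa using hq) hnd
  rw [hk] at h1; rw [h1] at h2
  exact Prod.ext hk (by simpa using h2)

theorem pvRank_unfold (k : String) :
    pvRank k =
      if PySem.Str.isIn "policy_last_minute" k then 1
      else if PySem.Str.isIn "policy_regular" k then 2
      else if PySem.Str.isIn "policy_look_ahead" k then 3
      else if PySem.Str.isIn "gurobi" k then 4
      else if PySem.Str.isIn "hexaly" k then 5
      else 0 := by
  simp only [pvRank, pvCats, List.findIdx?_cons, List.findIdx?_nil]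
  split_ifs <;> simp_all

theorem pv_blocks_eq (s : List (String × Int)) :
    pvBlocks s pvCats
      = pvF s 1 ++ (pvF s 2 ++ (pvF s 3 ++ (pvF s 4 ++ pvF s 5))) := by
  simp only [pvCats, pvBlocks, List.filter_filter, List.append_nil, List.append_assoc]
  refine congrArg₂ (· ++ ·) ?_ (congrArg₂ (· ++ ·) ?_ (congrArg₂ (· ++ ·) ?_
    (congrArg₂ (· ++ ·) ?_ ?_))) <;>
  · refine List.filter_congr fun p _ => ?_
    rw [pvRank_unfold]
    split_ifs <;> simp_all

theorem pvF_pairwise {s : List (String × Int)} (h : s.Pairwise (fun a b => a.1 < b.1))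
    (i : Nat) : (pvF s i).Pairwise pvKeyLt := by
  have h2 : (pvF s i).Pairwise (fun a b => a.1 < b.1) := h.filter _
  refine h2.imp_of_mem ?_
  intro a b ha hb hlt
  have hra : pvRank a.1 = i := by simpa using (List.mem_filter.mp ha).2
  have hrb : pvRank b.1 = i := by simpa using (List.mem_filter.mp hb).2
  exact Prod.Lex.lt_iff.mpr (Or.inr ⟨by simp [hra, hrb], by simpa using hlt⟩)

theorem pvF_cross {s : List (String × Int)} {i j : Nat} (hij : i < j) :
    ∀ a ∈ pvF s i, ∀ b ∈ pvF s j, pvKeyLt a b := by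
  intro a ha b hb
  have hra : pvRank a.1 = i := by simpa using (List.mem_filter.mp ha).2
  have hrb : pvRank b.1 = j := by simpa using (List.mem_filter.mp hb).2
  exact Prod.Lex.lt_iff.mpr (Or.inl (by simp [hra, hrb, hij]))

theorem pv_find?_filter_ne : ∀ (l : List (String × Int)) (k k' : String), k' ≠ k →
    (l.filter (fun p => !(p.1 == k))).find? (fun p => p.1 == k')
      = l.find? (fun p => p.1 == k') := by
  intro l k k' h
  induction l with
  | nil => simp
  | cons a rest ih =>
    by_cases ha : a.1 = k'
    · simp [List.filter_cons, ha, h, List.find?_cons]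
    · by_cases hak : a.1 = k <;> simp [List.filter_cons, hak, List.find?_cons, ha, ih, Ne.symm h]

theorem pv_get?_erase_of_ne (d : PySem.Dict String Int) {k k' : String} (h : k' ≠ k) :
    (d.erase k).get? k' = d.get? k' := by
  simp only [PySem.Dict.get?, PySem.Dict.erase]
  rw [pv_find?_filter_ne d.items k k' h]

theorem pv_contains_erase_self (d : PySem.Dict String Int) (k : String) :
    (d.erase k).contains k = false := by
  simp [PySem.Dict.contains, PySem.Dict.erase, List.any_filter]

theorem pv_popins :
    ∀ (ks : List String) (d : PySem.Dict String Int),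
      ks.Nodup → d.keys.Nodup → (∀ k ∈ ks, d.contains k = true) →
      (ks.foldl (fun d k =>
          match d.pop? k with
          | some (v, d') => d'.insert k v
          | none => d) d).items
        = d.items.filter (fun p => !decide (p.1 ∈ ks)) ++ ks.map (fun k => (k, d.getD k 0)) := by
  intro ks
  induction ks with
  | nil => intro d _ _ _; simp
  | cons k rest ih =>
    intro d hnd hknd hcont
    have hck : d.contains k = true := hcont k (List.mem_cons_self)
    have hget : d.get? k = some (d.getD k 0) := by
      rw [PySem.Dict.contains_eq_isSome_get?] at hck
      rcases Option.isSome_iff_exists.mp hck with ⟨v, hv⟩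
      rw [PySem.Dict.getD_eq_get?_getD, hv]; rfl
    have hpop : d.pop? k = some (d.getD k 0, d.erase k) := by
      simp [PySem.Dict.pop?, hget]
    have hce : (d.erase k).contains k = false := pv_contains_erase_self d k
    have hitems : ((d.erase k).insert k (d.getD k 0)).items
        = d.items.filter (fun p => !(p.1 == k)) ++ [(k, d.getD k 0)] := by
      rw [PySem.Dict.items_insert_of_not_contains _ _ hce]; rfl
    set d1 := (d.erase k).insert k (d.getD k 0) with hd1
    have hkeys1 : d1.keys.Nodup := by
      show (d1.items.map (·.1)).Nodup
      rw [hitems, List.map_append]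
      refine List.Nodup.append ?_ (by simp) ?_
      · exact ((List.filter_sublist (l := d.items)).map (fun p : String × Int => p.1)).nodup hknd
      · intro a ha hb
        rcases List.mem_map.mp ha with ⟨p, hp, hpa⟩
        have h2 := (List.mem_filter.mp hp).2
        rw [hpa] at h2
        simp at hb
        simp [hb] at h2
    have hcont1 : ∀ k' ∈ rest, d1.contains k' = true := by
      intro k' hk'
      have hne : k' ≠ k := fun he => (List.nodup_cons.mp hnd).1 (he ▸ hk')
      rw [hd1, PySem.Dict.contains_insert, PySem.Dict.contains_eq_isSome_get?,
        pv_get?_erase_of_ne d hne, ← PySem.Dict.contains_eq_isSome_get?,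
        hcont k' (List.mem_cons_of_mem _ hk')]
      simp
    have hgetD1 : ∀ k' ∈ rest, d1.getD k' 0 = d.getD k' 0 := by
      intro k' hk'
      have hne : k' ≠ k := fun he => (List.nodup_cons.mp hnd).1 (he ▸ hk')
      rw [hd1, PySem.Dict.getD_eq_get?_getD, PySem.Dict.get?_insert_of_ne _ _ hne,
        pv_get?_erase_of_ne d hne, ← PySem.Dict.getD_eq_get?_getD]
    simp only [List.foldl_cons, hpop]
    rw [ih d1 (List.nodup_cons.mp hnd).2 hkeys1 hcont1]
    rw [hitems, List.filter_append, List.filter_filter]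
    have h1 : (List.filter (fun p => !decide (p.1 ∈ rest) && !(p.1 == k)) d.items)
        = d.items.filter (fun p => !decide (p.1 ∈ k :: rest)) := by
      refine List.filter_congr fun p _ => ?_
      by_cases h1 : p.1 = k <;> by_cases h2 : p.1 ∈ rest <;> simp [h1, h2]
    have h2 : List.filter (fun p => !decide (p.1 ∈ rest)) [(k, d.getD k 0)]
        = [(k, d.getD k 0)] := by
      simp [(List.nodup_cons.mp hnd).1]
    rw [h1, h2, List.map_cons]
    have h3 : rest.map (fun k' => (k', d1.getD k' 0)) = rest.map (fun k' => (k', d.getD k' 0)) :=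
      List.map_congr_left fun k' hk' => by rw [hgetD1 k' hk']
    rw [h3]
    simp

theorem pv_pass_items (c : String → Bool) :
    ∀ (l : List (String × Int)) (tmp : PySem.Dict String Int),
      (l.map (·.1)).Nodup → tmp.keys.Nodup →
      (∀ p ∈ l, tmp.get? p.1 = some p.2 ∨ tmp.contains p.1 = false) →
      (l.foldl (fun t p => if c p.1 then t.insert p.1 p.2 else t) tmp).items
        = tmp.items ++ l.filter (fun p => c p.1 && !tmp.contains p.1) := by
  intro l
  induction l with
  | nil => intro tmp _ _ _; simp
  | cons p rest ih =>
    intro tmp hnd hk hag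
    rw [List.map_cons] at hnd
    have hndc := List.nodup_cons.mp hnd
    have hp1 : p.1 ∉ rest.map (·.1) := hndc.1
    by_cases hc : c p.1
    · rcases hag p List.mem_cons_self with hg | hnc
      · have hct : tmp.contains p.1 = true := by
          rw [PySem.Dict.contains_eq_isSome_get?, hg]; rfl
        have hins : tmp.insert p.1 p.2 = tmp := by
          apply PySem.Dict.ext
          rw [PySem.Dict.items_insert_of_contains _ _ hct]
          have hmc : ∀ q ∈ tmp.items, (if q.1 == p.1 then (p.1, p.2) else q) = q := by
            intro q hq
            by_cases hqp : q.1 = p.1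
            · have := PySem.Dict.get?_of_mem_items tmp (k := q.1) (v := q.2)
                (by simpa using hq) hk
              rw [hqp, hg] at this
              simp only [hqp, beq_self_eq_true, if_pos]
              exact Prod.ext hqp.symm (by simpa using this)
            · simp [hqp]
          rw [List.map_congr_left hmc]
          simp
        simp only [List.foldl_cons, if_pos hc, hins]
        rw [ih tmp hndc.2 hk (fun q hq => hag q (List.mem_cons_of_mem _ hq))]
        simp [List.filter_cons, hc, hct]
      · have hitems : (tmp.insert p.1 p.2).items = tmp.items ++ [p] := by
          rw [PySem.Dict.items_insert_of_not_contains _ _ hnc]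
        have hk' : (tmp.insert p.1 p.2).keys.Nodup := PySem.Dict.nodup_keys_insert _ _ _ hk
        have hag' : ∀ q ∈ rest,
            (tmp.insert p.1 p.2).get? q.1 = some q.2 ∨ (tmp.insert p.1 p.2).contains q.1 = false := by
          intro q hq
          have hne : q.1 ≠ p.1 := fun he => hp1 (he ▸ List.mem_map_of_mem hq)
          rcases hag q (List.mem_cons_of_mem _ hq) with hg | hncq
          · exact Or.inl (by rw [PySem.Dict.get?_insert_of_ne _ _ hne, hg])
          · refine Or.inr ?_
            rw [PySem.Dict.contains_insert, hncq]
            simp [hne]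
        simp only [List.foldl_cons, if_pos hc]
        rw [ih _ hndc.2 hk' hag', hitems]
        have hfc : rest.filter (fun q => c q.1 && !(tmp.insert p.1 p.2).contains q.1)
            = rest.filter (fun q => c q.1 && !tmp.contains q.1) := by
          refine List.filter_congr fun q hq => ?_
          have hne : q.1 ≠ p.1 := fun he => hp1 (he ▸ List.mem_map_of_mem hq)
          rw [PySem.Dict.contains_insert]
          have hb : (q.1 == p.1) = false := beq_eq_false_iff_ne.mpr hne
          simp [hb]
        rw [hfc]
        simp [List.filter_cons, hc, hnc]
    · simp only [List.foldl_cons, if_neg hc]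
      rw [ih tmp hndc.2 hk (fun q hq => hag q (List.mem_cons_of_mem _ hq))]
      simp [List.filter_cons, hc]

theorem pv_contains_mk_iff (u : List (String × Int)) (k : String) :
    (PySem.Dict.mk (κ := String) (ν := Int) u).contains k = true ↔ ∃ r ∈ u, r.1 = k := by
  simp [PySem.Dict.contains, List.any_eq_true, beq_iff_eq]

theorem pv_passes_items (s : List (String × Int)) (hs : (s.map (·.1)).Nodup) :
    ∀ (cs : List String) (u : List (String × Int)) (q : String × Int → Bool),
      (u.map (·.1)).Nodup →
      (∀ p ∈ u, p ∈ s) →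
      (∀ p ∈ s, p ∈ u ↔ q p = false) →
      (cs.foldl
          (fun tmp c =>
            s.foldl (fun t p => if PySem.Str.isIn c p.1 then t.insert p.1 p.2 else t) tmp)
          (PySem.Dict.mk u)).items
        = u ++ pvBlocks (s.filter q) cs := by
  intro cs
  induction cs with
  | nil => intro u q _ _ _; simp [pvBlocks]
  | cons c rest ih =>
    intro u q hund husub humem
    have hukeys : (PySem.Dict.mk (κ := String) (ν := Int) u).keys.Nodup := hund
    have hagree : ∀ p ∈ s,
        (PySem.Dict.mk u).get? p.1 = some p.2 ∨ (PySem.Dict.mk u).contains p.1 = false := by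
      intro p hp
      by_cases hct : (PySem.Dict.mk (κ := String) (ν := Int) u).contains p.1 = true
      · refine Or.inl ?_
        rcases (pv_contains_mk_iff u p.1).mp hct with ⟨r, hru, hrp⟩
        have : r = p := pv_uniq hs r (husub r hru) p hp hrp
        subst this
        exact PySem.Dict.get?_of_mem_items _ (by simpa using hru) hukeys
      · exact Or.inr (Bool.eq_false_iff.mpr hct)
    have hcontmem : ∀ p ∈ s, (PySem.Dict.mk (κ := String) (ν := Int) u).contains p.1 = !q p := by
      intro p hp
      by_cases hqp : q p = true
      · have hpu : p ∉ u := fun hc => by simp [humem p hp |>.mp hc] at hqp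
        have : (PySem.Dict.mk (κ := String) (ν := Int) u).contains p.1 = false := by
          by_contra hcc
          have hct : (PySem.Dict.mk (κ := String) (ν := Int) u).contains p.1 = true := by
            simpa using hcc
          rcases (pv_contains_mk_iff u p.1).mp hct with ⟨r, hru, hrp⟩
          exact hpu ((pv_uniq hs r (husub r hru) p hp hrp) ▸ hru)
        rw [this, hqp]; rfl
      · have hqf : q p = false := by simpa using hqp
        have hpu : p ∈ u := (humem p hp).mpr hqf
        have : (PySem.Dict.mk (κ := String) (ν := Int) u).contains p.1 = true :=
          (pv_contains_mk_iff u p.1).mpr ⟨p, hpu, rfl⟩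
        rw [this, hqf]; rfl
    simp only [List.foldl_cons]
    have h1 := pv_pass_items (fun k => PySem.Str.isIn c k) s (PySem.Dict.mk u) hs hukeys hagree
    have h1' : (s.foldl (fun t p => if PySem.Str.isIn c p.1 then t.insert p.1 p.2 else t)
          (PySem.Dict.mk u)).items
        = u ++ s.filter (fun p => PySem.Str.isIn c p.1 && q p) := by
      rw [h1]
      congr 1
      refine List.filter_congr fun p hp => ?_
      rw [hcontmem p hp]
      simp
    set u' := u ++ s.filter (fun p => PySem.Str.isIn c p.1 && q p) with hu'
    have hd1 : (s.foldl (fun t p => if PySem.Str.isIn c p.1 then t.insert p.1 p.2 else t)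
        (PySem.Dict.mk u)) = PySem.Dict.mk u' := PySem.Dict.ext h1'
    rw [hd1]
    have hu'nd : (u'.map (·.1)).Nodup := by
      rw [hu', List.map_append]
      refine List.Nodup.append hund (((List.filter_sublist (l := s)).map _).nodup hs) ?_
      intro a ha hb
      rcases List.mem_map.mp ha with ⟨r, hru, hra⟩
      rcases List.mem_map.mp hb with ⟨w, hwf, hwa⟩
      have hwmem := List.mem_filter.mp hwf
      have : r = w := pv_uniq hs r (husub r hru) w hwmem.1 (by rw [hra, hwa])
      subst this
      have hqr : q r = false := (humem r hwmem.1).mp hru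
      simp [hqr] at hwmem
    have hu'sub : ∀ p ∈ u', p ∈ s := by
      intro p hp
      rcases List.mem_append.mp hp with h | h
      · exact husub p h
      · exact (List.mem_filter.mp h).1
    have hu'mem : ∀ p ∈ s, p ∈ u' ↔ (fun p => q p && !PySem.Str.isIn c p.1) p = false := by
      intro p hp
      constructor
      · intro hmem
        rcases List.mem_append.mp hmem with h | h
        · have := (humem p hp).mp h
          simp [this]
        · have := (List.mem_filter.mp h).2
          simp at this ⊢
          intro _
          exact this.1
      · intro hf
        simp only [Bool.and_eq_false_iff, Bool.not_eq_false'] at hf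
        rcases hf with h | h
        · exact List.mem_append_left _ ((humem p hp).mpr h)
        · by_cases hq : q p = true
          · exact List.mem_append_right _ (List.mem_filter.mpr ⟨hp, by
              simp only [PySem.Str.isIn] at h
              simp [h, hq]⟩)
          · exact List.mem_append_left _ ((humem p hp).mpr (by simpa using hq))
    rw [ih u' (fun p => q p && !PySem.Str.isIn c p.1) hu'nd hu'sub hu'mem]
    have e1 : s.filter (fun p => PySem.Str.isIn c p.1 && q p)
        = (s.filter q).filter (fun p => PySem.Str.isIn c p.1) := List.filter_filter.symm
    have e2 : s.filter (fun p => q p && !PySem.Str.isIn c p.1)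
        = (s.filter q).filter (fun p => !PySem.Str.isIn c p.1) := by
      rw [List.filter_filter]
      exact List.filter_congr fun p _ => Bool.and_comm _ _
    rw [hu', e1, e2, List.append_assoc]
    rfl

theorem pvPassA_eq (d : PySem.Dict String Int) (cat : String) (tmp : PySem.Dict String Int)
    (hnd : d.keys.Nodup) :
    pvPassA d cat tmp
      = d.items.foldl (fun t p => if PySem.Str.isIn cat p.1 then t.insert p.1 p.2 else t) tmp := by
  unfold pvPassA
  show (d.items.map (fun x => x.1)).foldl _ tmp = _
  rw [List.foldl_map]
  refine PySem.List.foldl_congr_mem _ _ _ _ ?_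
  intro t q hq
  have : d.getD q.1 0 = q.2 :=
    PySem.Dict.getD_of_mem_items d (by simpa using hq) hnd 0
  rw [this]

theorem pv_count_F (s : List (String × Int)) (i : Nat) (x : String × Int) :
    (pvF s i).count x = if pvRank x.1 = i then s.count x else 0 := by
  unfold pvF
  by_cases h : pvRank x.1 = i
  · rw [List.count_filter (by simp [h]), if_pos h]
  · rw [if_neg h]
    exact List.count_eq_zero.mpr (by simp [h])

theorem pv_keyLt_ne {a b : String × Int} (h : pvKeyLt a b) : a.1 ≠ b.1 := by
  intro he
  rcases Prod.Lex.lt_iff.mp h with h1 | h1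
  · simp [he] at h1
  · rw [he] at h1
    exact lt_irrefl _ h1.2

theorem pvRank_le (k : String) : pvRank k ≤ 5 := by
  rw [pvRank_unfold]; split_ifs <;> omega

theorem sort_log_py_main (log : List (String × Int)) :
    sort_log_py log = sort_log_py_alt log := by
  have htnd : (((PySem.Dict.ofList log).items).map (·.1)).Nodup :=
    PySem.Dict.nodup_keys_ofList log
  simp only [sort_log_py, sort_log_py_alt]
  set t := (PySem.Dict.ofList log).items with ht
  set s := PySem.List.sorted t (fun p => p.1) false with hsdef
  have hperm : s.Perm t := PySem.List.sorted_perm t _ false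
  have hsnd : (s.map (·.1)).Nodup := ((hperm.map _).nodup_iff).mpr htnd
  have hle : s.Pairwise (fun a b => a.1 ≤ b.1) := PySem.List.sorted_pairwise t (fun p => p.1)
  have hne : s.Pairwise (fun a b => a.1 ≠ b.1) := List.pairwise_map.mp hsnd
  have hlt : s.Pairwise (fun a b => a.1 < b.1) :=
    (hle.and hne).imp (fun h => lt_of_le_of_ne h.1 h.2)
  have hkeysmk : (PySem.Dict.mk (κ := String) (ν := Int) s).keys.Nodup := hsnd
  have hofs : PySem.Dict.ofList s = PySem.Dict.mk s := PySem.Dict.ext (pv_items_ofList hsnd)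
  rw [hofs]
  set B5 := pvF s 1 ++ (pvF s 2 ++ (pvF s 3 ++ (pvF s 4 ++ pvF s 5))) with hB5
  -- the five passes compute the dict whose items are B5
  have hchain :
      pvPassA (PySem.Dict.mk s) "hexaly" (pvPassA (PySem.Dict.mk s) "gurobi"
        (pvPassA (PySem.Dict.mk s) "policy_look_ahead" (pvPassA (PySem.Dict.mk s) "policy_regular"
          (pvPassA (PySem.Dict.mk s) "policy_last_minute" PySem.Dict.empty))))
      = pvCats.foldl
          (fun tmp c =>
            s.foldl (fun t' p => if PySem.Str.isIn c p.1 then t'.insert p.1 p.2 else t') tmp)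
          (PySem.Dict.mk []) := by
    simp only [pvCats, List.foldl_cons, List.foldl_nil]
    rw [pvPassA_eq _ _ _ hkeysmk, pvPassA_eq _ _ _ hkeysmk, pvPassA_eq _ _ _ hkeysmk,
      pvPassA_eq _ _ _ hkeysmk, pvPassA_eq _ _ _ hkeysmk]
    rfl
  have hpass := pv_passes_items s hsnd pvCats [] (fun _ => true) (by simp) (by simp) (by simp)
  rw [List.filter_true] at hpass
  have htmp5 :
      (pvPassA (PySem.Dict.mk s) "hexaly" (pvPassA (PySem.Dict.mk s) "gurobi"
        (pvPassA (PySem.Dict.mk s) "policy_look_ahead" (pvPassA (PySem.Dict.mk s) "policy_regular"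
          (pvPassA (PySem.Dict.mk s) "policy_last_minute" PySem.Dict.empty))))).items = B5 := by
    rw [hchain, hpass, pv_blocks_eq, List.nil_append, hB5]
  -- membership facts about B5
  have hB5fact : ∀ r ∈ B5, r ∈ s ∧ pvRank r.1 ≠ 0 := by
    intro r hr
    rw [hB5] at hr
    rcases List.mem_append.mp hr with h | h
    · exact ⟨(List.mem_filter.mp h).1, by have := (List.mem_filter.mp h).2; simp at this; omega⟩
    rcases List.mem_append.mp h with h | h
    · exact ⟨(List.mem_filter.mp h).1, by have := (List.mem_filter.mp h).2; simp at this; omega⟩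
    rcases List.mem_append.mp h with h | h
    · exact ⟨(List.mem_filter.mp h).1, by have := (List.mem_filter.mp h).2; simp at this; omega⟩
    rcases List.mem_append.mp h with h | h
    · exact ⟨(List.mem_filter.mp h).1, by have := (List.mem_filter.mp h).2; simp at this; omega⟩
    · exact ⟨(List.mem_filter.mp h).1, by have := (List.mem_filter.mp h).2; simp at this; omega⟩
  have hB5in : ∀ p ∈ s, pvRank p.1 ≠ 0 → p ∈ B5 := by
    intro p hp hr
    have h5 : pvRank p.1 ≤ 5 := pvRank_le p.1
    rw [hB5]
    interval_cases h : pvRank p.1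
    · exact absurd rfl hr
    · exact List.mem_append_left _ (List.mem_filter.mpr ⟨hp, by simp [h]⟩)
    · exact List.mem_append_right _ (List.mem_append_left _ (List.mem_filter.mpr ⟨hp, by simp [h]⟩))
    · exact List.mem_append_right _ (List.mem_append_right _ (List.mem_append_left _
        (List.mem_filter.mpr ⟨hp, by simp [h]⟩)))
    · exact List.mem_append_right _ (List.mem_append_right _ (List.mem_append_right _
        (List.mem_append_left _ (List.mem_filter.mpr ⟨hp, by simp [h]⟩))))
    · exact List.mem_append_right _ (List.mem_append_right _ (List.mem_append_right _
        (List.mem_append_right _ (List.mem_filter.mpr ⟨hp, by simp [h]⟩))))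
  -- pairwise structure of the blocks
  have hcross : ∀ {i j : Nat}, i < j → ∀ a ∈ pvF s i, ∀ b ∈ pvF s j, pvKeyLt a b :=
    fun hij => pvF_cross hij
  have h45 : (pvF s 4 ++ pvF s 5).Pairwise pvKeyLt :=
    List.pairwise_append.mpr ⟨pvF_pairwise hlt 4, pvF_pairwise hlt 5, hcross (by omega)⟩
  have h345 : (pvF s 3 ++ (pvF s 4 ++ pvF s 5)).Pairwise pvKeyLt :=
    List.pairwise_append.mpr ⟨pvF_pairwise hlt 3, h45, fun a ha b hb =>
      (List.mem_append.mp hb).elim (fun h => hcross (by omega) a ha b h)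
        (fun h => hcross (by omega) a ha b h)⟩
  have h2345 : (pvF s 2 ++ (pvF s 3 ++ (pvF s 4 ++ pvF s 5))).Pairwise pvKeyLt :=
    List.pairwise_append.mpr ⟨pvF_pairwise hlt 2, h345, fun a ha b hb => by
      rcases List.mem_append.mp hb with h | h
      · exact hcross (by omega) a ha b h
      rcases List.mem_append.mp h with h | h
      · exact hcross (by omega) a ha b h
      · exact hcross (by omega) a ha b h⟩
  have hp5 : B5.Pairwise pvKeyLt := by
    rw [hB5]
    refine List.pairwise_append.mpr ⟨pvF_pairwise hlt 1, h2345, fun a ha b hb => ?_⟩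
    rcases List.mem_append.mp hb with h | h
    · exact hcross (by omega) a ha b h
    rcases List.mem_append.mp h with h | h
    · exact hcross (by omega) a ha b h
    rcases List.mem_append.mp h with h | h
    · exact hcross (by omega) a ha b h
    · exact hcross (by omega) a ha b h
  have hCpair : (pvF s 0 ++ B5).Pairwise pvKeyLt := by
    refine List.pairwise_append.mpr ⟨pvF_pairwise hlt 0, hp5, fun a ha b hb => ?_⟩
    have hra : pvRank a.1 = 0 := by simpa using (List.mem_filter.mp ha).2
    have hrb := (hB5fact b hb).2
    exact Prod.Lex.lt_iff.mpr (Or.inl (by simp [hra]; omega))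
  have hCnd : ((pvF s 0 ++ B5).map (·.1)).Nodup :=
    List.pairwise_map.mpr (hCpair.imp pv_keyLt_ne)
  have hksnd : (B5.map (·.1)).Nodup := by
    have h2 := hCnd
    rw [List.map_append] at h2
    exact (List.nodup_append.mp h2).2.1
  -- A's final pop/reinsert loop
  have hkeys5 :
      (pvPassA (PySem.Dict.mk s) "hexaly" (pvPassA (PySem.Dict.mk s) "gurobi"
        (pvPassA (PySem.Dict.mk s) "policy_look_ahead" (pvPassA (PySem.Dict.mk s) "policy_regular"
          (pvPassA (PySem.Dict.mk s) "policy_last_minute" PySem.Dict.empty))))).keys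
        = B5.map (·.1) := by
    show List.map _ _ = _
    rw [htmp5]
  rw [hkeys5]
  have hcont : ∀ k ∈ B5.map (·.1), (PySem.Dict.mk (κ := String) (ν := Int) s).contains k = true := by
    intro k hk
    rcases List.mem_map.mp hk with ⟨p, hp, hpk⟩
    exact (pv_contains_mk_iff s k).mpr ⟨p, (hB5fact p hp).1, hpk⟩
  rw [pv_popins (B5.map (·.1)) (PySem.Dict.mk s) hksnd hkeysmk hcont]
  have hmapback : (B5.map (·.1)).map
      (fun k => (k, (PySem.Dict.mk (κ := String) (ν := Int) s).getD k 0)) = B5 := by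
    rw [List.map_map]
    have : ∀ p ∈ B5,
        ((fun k => (k, (PySem.Dict.mk (κ := String) (ν := Int) s).getD k 0)) ∘ (·.1)) p = id p := by
      intro p hp
      have hgd : (PySem.Dict.mk (κ := String) (ν := Int) s).getD p.1 0 = p.2 :=
        PySem.Dict.getD_of_mem_items _ (by simpa using (hB5fact p hp).1) hkeysmk 0
      simp [hgd]
    rw [List.map_congr_left this, List.map_id]
  have hfilter0 :
      s.filter (fun p => !decide (p.1 ∈ B5.map (·.1))) = pvF s 0 := by
    refine List.filter_congr fun p hp => ?_
    have hiff : p.1 ∈ B5.map (·.1) ↔ pvRank p.1 ≠ 0 := by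
      constructor
      · intro hmem
        rcases List.mem_map.mp hmem with ⟨r, hr, hrk⟩
        have hfact := hB5fact r hr
        have : r = p := pv_uniq hsnd r hfact.1 p hp hrk
        exact this ▸ hfact.2
      · intro h0
        exact List.mem_map_of_mem (hB5in p hp h0)
    by_cases h0 : pvRank p.1 = 0 <;> simp [hiff, h0]
  rw [hmapback, hfilter0]
  -- B's single keyed sort produces exactly the same list
  have hcount : ∀ x : String × Int, (pvF s 0 ++ B5).count x = s.count x := by
    intro x
    have h5 : pvRank x.1 ≤ 5 := pvRank_le x.1
    simp only [hB5, List.count_append, pv_count_F]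
    set r := pvRank x.1 with hr
    interval_cases r <;> simp
  have hBperm : (pvF s 0 ++ B5).Perm t :=
    (List.perm_iff_count.mpr (fun x => by rw [hcount x, List.Perm.count_eq hperm])).trans hperm
  have hsortB : PySem.List.sorted t
      (fun kv => (toLex (pvRank kv.1, kv.1) : Lex (Nat × String))) false = pvF s 0 ++ B5 :=
    PySem.List.sorted_eq_of_perm_of_pairwise_lt t _ _ hBperm hCpair
  rw [hsortB, pv_items_ofList hCnd]

-- ===== VERDICT (by name: the statement is the Claim_ definition above) =====
theorem sort_log_py_spec : Claim_equal_sort_log_py := by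
  intro log _
  unfold Spec_sort_log_py
  exact sort_log_py_main log
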